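-- pv_equiv track=rewrite | github.com/Siddharth1047/code-till-job | Day-63.py | hasDistinct
-- ===== SOURCE A (Python) =====
-- def hasDistinct(year):
--     year_str = str(year)
--     year_set = set()
--
--     for i in year_str:
--         if i in year_set:
--             return False
--         year_set.add(i)
--     return True
-- ===== SOURCE B (Python) =====
-- def hasDistinct(year):
--     s = sorted(str(year))
--     for a, b in zip(s, s[1:]):
--         if a == b:
--             return False
--     return True
-- ===== Notes on version B (the rewrite author's own statement) =====
-- stated objective: alternative
-- what changed: B sorts the characters of str(year) and makes a single adjacent-pair scan instead of A's membership loop maintaining a set.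
import Mathlib
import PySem

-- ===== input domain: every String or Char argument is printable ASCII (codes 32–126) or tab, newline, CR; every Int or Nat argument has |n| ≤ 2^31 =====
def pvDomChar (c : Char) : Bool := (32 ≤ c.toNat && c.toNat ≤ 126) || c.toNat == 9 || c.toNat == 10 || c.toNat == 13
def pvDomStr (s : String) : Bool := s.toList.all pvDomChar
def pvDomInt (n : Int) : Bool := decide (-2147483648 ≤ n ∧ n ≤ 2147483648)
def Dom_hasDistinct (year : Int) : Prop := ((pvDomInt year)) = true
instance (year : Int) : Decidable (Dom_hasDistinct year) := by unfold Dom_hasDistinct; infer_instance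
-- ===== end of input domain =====

-- B sorts the characters of str(year) and scans adjacent pairs once, instead of A's
-- early-exit membership loop maintaining a set; equivalence proved for all Int inputs.

-- ===== PORT A =====
-- the 'for i in year_str' loop with its early return, state = the set built so far
def hasDistinctLoopA : List Char → PySem.Set Char → Bool
  | [], _ => true
  | c :: rest, s => if PySem.Set.contains s c then false else hasDistinctLoopA rest (PySem.Set.add s c)

def hasDistinct (year : Int) : Bool :=
  hasDistinctLoopA (PySem.Int.toChars year) PySem.Set.empty

-- ===== PORT B =====
-- the 'for a, b in zip(s, s[1:])' loop with its early return
def adjDistinctB : List Char → Bool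
  | a :: b :: rest => if a == b then false else adjDistinctB (b :: rest)
  | _ => true

def hasDistinct_alt (year : Int) : Bool :=
  adjDistinctB (PySem.List.sorted (PySem.Int.toChars year) (fun x => x) false)

-- ===== PRECONDITION & SPEC =====
def Spec_hasDistinct (year : Int) (out : Bool) : Prop := out = hasDistinct_alt year
instance (year : Int) (out : Bool) : Decidable (Spec_hasDistinct year out) := by unfold Spec_hasDistinct; infer_instance

-- ===== CLAIM (what is proved, stated in full; the proofs are below) =====
def Claim_equal_hasDistinct : Prop := ∀ (year : Int), Dom_hasDistinct year → Spec_hasDistinct year (hasDistinct year)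

-- ===== LEMMAS AND PROOFS =====

theorem loopA_true_iff (l : List Char) (s : PySem.Set Char) :
    hasDistinctLoopA l s = true ↔ l.Nodup ∧ ∀ c ∈ l, c ∉ s := by
  induction l generalizing s with
  | nil => simp [hasDistinctLoopA]
  | cons c rest ih =>
    simp only [hasDistinctLoopA]
    by_cases hc : c ∈ s
    · simp only [(PySem.Set.contains_iff s c).mpr hc, if_true]
      constructor
      · intro h; exact absurd h (by simp)
      · rintro ⟨_, hall⟩; exact absurd hc ((hall c (by simp)))
    · have hcb : PySem.Set.contains s c = false := by
        cases hh : PySem.Set.contains s c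
        · rfl
        · exact absurd ((PySem.Set.contains_iff s c).mp hh) hc
      simp only [hcb, Bool.false_eq_true, if_false, ih, List.nodup_cons, List.mem_cons,
        PySem.Set.mem_add]
      constructor
      · rintro ⟨hn, hall⟩
        have hcr : c ∉ rest := fun hmem => (hall c hmem) (Or.inr rfl)
        refine ⟨⟨hcr, hn⟩, ?_⟩
        rintro d (hd | hd)
        · exact hd ▸ hc
        · exact fun hds => (hall d hd) (Or.inl hds)
      · rintro ⟨⟨hcr, hn⟩, hall⟩
        refine ⟨hn, ?_⟩
        intro d hd
        rintro (hds | hdc)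
        · exact hall d (Or.inr hd) hds
        · exact hcr (hdc ▸ hd)

theorem adjDistinct_true_iff (l : List Char) :
    adjDistinctB l = true ↔ l.IsChain (· ≠ ·) := by
  induction l with
  | nil => simp [adjDistinctB]
  | cons a t ih =>
    cases t with
    | nil => simp [adjDistinctB]
    | cons b rest =>
      simp only [adjDistinctB, List.isChain_cons_cons]
      by_cases hab : a = b
      · simp [hab]
      · simp only [beq_iff_eq, hab, if_false, ih, ne_eq, not_false_iff, true_and]

theorem nodup_of_sorted_chain_ne (l : List Char)
    (hs : l.Pairwise (· ≤ ·)) (hc : l.IsChain (· ≠ ·)) : l.Nodup := by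
  have hlt : l.IsChain (· < ·) := by
    induction l with
    | nil => exact List.IsChain.nil
    | cons a t ih =>
      cases t with
      | nil => exact List.IsChain.singleton a
      | cons b rest =>
        rw [List.isChain_cons_cons] at hc ⊢
        rw [List.pairwise_cons] at hs
        refine ⟨lt_of_le_of_ne (hs.1 b (by simp)) hc.1, ?_⟩
        exact ih hs.2 hc.2
  have hp : l.Pairwise (· < ·) := (List.isChain_iff_pairwise).mp hlt
  exact hp.imp ne_of_lt

theorem hasDistinct_true_iff (year : Int) :
    hasDistinct year = true ↔ (PySem.Int.toChars year).Nodup := by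
  rw [hasDistinct, loopA_true_iff]
  constructor
  · exact fun h => h.1
  · intro h
    refine ⟨h, ?_⟩
    intro c _ hc
    simp [PySem.Set.empty] at hc

theorem hasDistinct_alt_true_iff (year : Int) :
    hasDistinct_alt year = true ↔ (PySem.Int.toChars year).Nodup := by
  rw [hasDistinct_alt, adjDistinct_true_iff]
  have hperm : (PySem.List.sorted (PySem.Int.toChars year) (fun x => x) false).Perm
      (PySem.Int.toChars year) := PySem.List.sorted_perm _ _ _
  have hpw : (PySem.List.sorted (PySem.Int.toChars year) (fun x => x) false).Pairwise (· ≤ ·) := by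
    simpa using PySem.List.sorted_pairwise (xs := PySem.Int.toChars year) (key := fun x => x)
  constructor
  · intro hc
    exact hperm.nodup_iff.mp (nodup_of_sorted_chain_ne _ hpw hc)
  · intro h
    exact List.Pairwise.isChain (hperm.nodup_iff.mpr h)

-- ===== VERDICT (by name: the statement is the Claim_ definition above) =====
theorem hasDistinct_spec : Claim_equal_hasDistinct := by
  intro year _
  unfold Spec_hasDistinct
  rw [Bool.eq_iff_iff, hasDistinct_true_iff, hasDistinct_alt_true_iff]
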